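-- pv_equiv track=rewrite | github.com/ChanghyunRyu/Python-CodingTest-note | binary_search/cross_the_stepping_stones/cross_the_stepping_stones_review.py | check_step_stones
-- ===== SOURCE A (Python) =====
-- def check_step_stones(target, stones, k):
--     chance = k-1
--     for stone in stones:
--         if stone >= target:
--             chance = k-1
--             continue
--         if chance > 0:
--             chance -= 1
--         else:
--             return False
--     return True
-- ===== SOURCE B (Python) =====
-- def check_step_stones(target, stones, k):
--     # Positions of stones at/above target split the line into gaps of removed
--     # stones; the crossing succeeds iff every gap is empty or shorter than k.
--     n = len(stones)
--     bounds = [-1] + [i for i, s in enumerate(stones) if s >= target] + [n]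
--     gaps = [b - a - 1 for a, b in zip(bounds, bounds[1:])]
--     return all(g == 0 or g < k for g in gaps)
-- ===== Notes on version B (the rewrite author's own statement) =====
-- stated objective: alternative
-- what changed: B replaces A's stateful countdown scan with early return by staged gap arithmetic: it first collects the indices of at/above-target stones, computes the gap between each consecutive pair of such positions (with virtual sentinels at -1 and len(stones)), and accepts iff every gap is empty or shorter than k.
import Mathlib
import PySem

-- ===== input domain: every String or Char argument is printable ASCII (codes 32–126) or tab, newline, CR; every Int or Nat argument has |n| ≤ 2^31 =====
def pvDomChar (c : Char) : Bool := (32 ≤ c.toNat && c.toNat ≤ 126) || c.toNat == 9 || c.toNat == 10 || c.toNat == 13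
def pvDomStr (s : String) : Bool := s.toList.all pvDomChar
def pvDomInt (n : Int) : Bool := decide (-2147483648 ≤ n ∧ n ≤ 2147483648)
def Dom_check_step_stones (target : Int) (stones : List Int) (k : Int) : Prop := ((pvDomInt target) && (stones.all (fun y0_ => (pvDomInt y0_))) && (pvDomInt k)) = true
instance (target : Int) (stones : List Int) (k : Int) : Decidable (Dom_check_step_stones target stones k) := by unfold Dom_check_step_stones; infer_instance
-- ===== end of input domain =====

-- B replaces A's stateful countdown scan by gap arithmetic: it collects the
-- positions of the at/above-target stones and checks the length of every gap
-- between consecutive such positions (objective: alternative decomposition).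

-- ===== PORT A =====
-- A's loop: state 'chance', reset on high stones, decremented on low ones, early False.
def checkLoopA (target k : Int) : List Int → Int → Bool
  | [], _ => true
  | stone :: rest, chance =>
    if stone ≥ target then checkLoopA target k rest (k - 1)
    else if chance > 0 then checkLoopA target k rest (chance - 1)
    else false

def check_step_stones (target : Int) (stones : List Int) (k : Int) : Bool :=
  checkLoopA target k stones (k - 1)

-- ===== PORT B =====
def check_step_stones_alt (target : Int) (stones : List Int) (k : Int) : Bool :=
  let n : Int := stones.length
  let bounds : List Int :=
    -1 :: ((((PySem.List.enumerate stones).filter (fun p => decide (p.2 ≥ target))).map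
        (fun p => p.1)) ++ [n])
  let gaps : List Int := List.zipWith (fun a b => b - a - 1) bounds bounds.tail
  gaps.all (fun g => g == 0 || decide (g < k))

-- ===== PRECONDITION & SPEC =====
def Spec_check_step_stones (target : Int) (stones : List Int) (k : Int) (out : Bool) : Prop := out = check_step_stones_alt target stones k
instance (target : Int) (stones : List Int) (k : Int) (out : Bool) : Decidable (Spec_check_step_stones target stones k out) := by unfold Spec_check_step_stones; infer_instance

-- ===== CLAIM (what is proved, stated in full; the proofs are below) =====
def Claim_equal_check_step_stones : Prop := ∀ (target : Int) (stones : List Int) (k : Int), Dom_check_step_stones target stones k → Spec_check_step_stones target stones k (check_step_stones target stones k)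

-- ===== LEMMAS AND PROOFS =====

-- lengths of the maximal runs of below-target stones, in order (boundaries included:
-- one entry per gap between consecutive high stones, possibly 0)
def pieces (target : Int) : List Int → List Int
  | [] => [0]
  | s :: rest =>
    if target ≤ s then 0 :: pieces target rest
    else (pieces target rest).modifyHead (· + 1)

-- the gap list computed from a bounds list a :: hs ++ [n]
def gapsOf (a : Int) : List Int → Int → List Int
  | [], n => [n - a - 1]
  | h :: t, n => (h - a - 1) :: gapsOf h t n

theorem pieces_ne_nil (target : Int) (xs : List Int) : pieces target xs ≠ [] := by
  cases xs with
  | nil => simp [pieces]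
  | cons s rest =>
    unfold pieces
    split
    · simp
    · cases h : pieces target rest with
      | nil => exact absurd h (pieces_ne_nil target rest)
      | cons a t => simp

theorem pieces_headI_nonneg (target : Int) (xs : List Int) : 0 ≤ (pieces target xs).headI := by
  induction xs with
  | nil => simp [pieces]
  | cons s rest ih =>
    unfold pieces
    split
    · simp
    · cases h : pieces target rest with
      | nil => exact absurd h (pieces_ne_nil target rest)
      | cons a t =>
        rw [h] at ih
        simp [List.modifyHead] at ih ⊢
        omega

theorem zipWith_gapsOf (a n : Int) (hs : List Int) :
    List.zipWith (fun a b => b - a - 1) (a :: (hs ++ [n])) (hs ++ [n]) = gapsOf a hs n := by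
  induction hs generalizing a with
  | nil => simp [gapsOf]
  | cons h t ih => simp [gapsOf, ← ih h]

theorem gapsOf_shift (a n : Int) (hs : List Int) :
    gapsOf (a - 1) hs n = (gapsOf a hs n).modifyHead (· + 1) := by
  cases hs with
  | nil => simp [gapsOf, List.modifyHead]; ring
  | cons h t => simp [gapsOf, List.modifyHead]; ring

theorem gapsOf_eq_pieces (target : Int) (xs : List Int) : ∀ s : Int,
    gapsOf (s - 1)
      (((PySem.List.enumerate xs s).filter (fun p => decide (p.2 ≥ target))).map (fun p => p.1))
      (s + xs.length) = pieces target xs := by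
  induction xs with
  | nil => intro s; simp [PySem.List.enumerate_nil, gapsOf, pieces]
  | cons x rest ih =>
    intro s
    rw [PySem.List.enumerate_cons]
    by_cases hx : target ≤ x
    · have : (decide ((s, x).2 ≥ target)) = true := by simpa using hx
      rw [List.filter_cons, if_pos this]
      simp only [List.map_cons, gapsOf, pieces, if_pos hx]
      have := ih (s + 1)
      have harith : (s + 1 : Int) + (rest.length : Int) = s + ((x :: rest).length : Int) := by
        simp only [List.length_cons]
        push_cast
        ring
      rw [harith] at this
      rw [show (s : Int) + 1 - 1 = s by ring] at this
      rw [this]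
      congr 1
      ring
    · have : (decide ((s, x).2 ≥ target)) = false := by simpa using hx
      rw [List.filter_cons, if_neg (by simp [this])]
      have := ih (s + 1)
      have harith : (s + 1 : Int) + (rest.length : Int) = s + ((x :: rest).length : Int) := by
        simp only [List.length_cons]
        push_cast
        ring
      rw [harith] at this
      rw [show (s : Int) - 1 = ((s + 1) - 1) - 1 by ring, gapsOf_shift, this]
      simp [pieces, if_neg hx]

theorem ok_beq (g k : Int) : (g == 0 || decide (g < k)) = (decide (g = 0) || decide (g < k)) := rfl

-- the invariant for A's loop: r low stones already consumed in the current run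
theorem loopA_eq (target k : Int) (xs : List Int) : ∀ r : Int, 0 ≤ r → (r = 0 ∨ r < k) →
    checkLoopA target k xs (k - 1 - r) =
      ((decide (r + (pieces target xs).headI = 0) || decide (r + (pieces target xs).headI < k))
        && (pieces target xs).tail.all (fun g => g == 0 || decide (g < k))) := by
  induction xs with
  | nil =>
    intro r hr hok
    simp only [checkLoopA, pieces]
    rcases hok with h | h
    · simp [h]
    · simp
      exact Or.inr h
  | cons x rest ih =>
    intro r hr hok
    unfold checkLoopA pieces
    by_cases hx : x ≥ target
    · rw [if_pos hx, if_pos (by omega : target ≤ x)]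
      have h0 := ih 0 le_rfl (Or.inl rfl)
      rw [show k - 1 - 0 = k - 1 by ring] at h0
      cases hp : pieces target rest with
      | nil => exact absurd hp (pieces_ne_nil target rest)
      | cons a t =>
        rw [hp] at h0
        rw [h0]
        simp only [List.headI, List.tail_cons, List.all_cons]
        rcases hok with h | h
        · subst h
          simp [ok_beq]
        · have hlt : r + 0 < k := by omega
          simp [ok_beq]
          intro _ _
          exact Or.inr h
    · rw [if_neg hx, if_neg (by omega : ¬ target ≤ x)]
      have hne := pieces_ne_nil target rest
      have hh := pieces_headI_nonneg target rest
      cases hp : pieces target rest with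
      | nil => exact absurd hp hne
      | cons a t =>
        rw [hp] at hh
        simp only [List.modifyHead, List.headI, List.tail_cons]
        simp only [List.headI] at hh
        by_cases hc : k - 1 - r > 0
        · rw [if_pos hc]
          have := ih (r + 1) (by omega) (Or.inr (by omega))
          rw [show k - 1 - r - 1 = k - 1 - (r + 1) by ring, this, hp]
          simp only [List.headI, List.tail_cons]
          simp only [show (r + 1 + a = 0) ↔ (r + (a + 1) = 0) from by constructor <;> omega,
            show (r + 1 + a < k) ↔ (r + (a + 1) < k) from by constructor <;> omega]
          rfl

        · rw [if_neg hc]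
          -- current run already has r + a + 1 ≥ k low stones (and ≥ 1): RHS is false
          have h1 : ¬ (r + (a + 1) = 0) := by omega
          have h2 : ¬ (r + (a + 1) < k) := by rcases hok with h | h <;> omega
          simp [h1, h2]

-- ===== VERDICT (by name: the statement is the Claim_ definition above) =====
theorem check_step_stones_spec : Claim_equal_check_step_stones := by
  intro target stones k _
  unfold Spec_check_step_stones check_step_stones check_step_stones_alt
  have hgaps := gapsOf_eq_pieces target stones 0
  rw [show (0 : Int) - 1 = -1 by ring, show (0 : Int) + (stones.length : Int) = stones.length by ring] at hgaps
  simp only [List.tail_cons]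
  rw [zipWith_gapsOf, hgaps]
  have := loopA_eq target k stones 0 le_rfl (Or.inl rfl)
  rw [show k - 1 - 0 = k - 1 by ring] at this
  rw [this]
  cases hp : pieces target stones with
  | nil => exact absurd hp (pieces_ne_nil target stones)
  | cons a t => simp only [List.headI, List.tail_cons, List.all_cons, ok_beq,
      show (0:Int) + a = a from by ring]
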